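-- pv_equiv track=rewrite | github.com/jeff-brown/forgotten-depths | src/server/game/world/world_manager.py | _matches_target
-- ===== SOURCE A (Python) =====
-- def _matches_target(search_term: str, target_name: str) -> bool:
--     """Check if search term matches target name (supports partial matching)."""
--     # Exact match
--     if search_term == target_name:
--         return True
--
--     # Partial match from beginning of words
--     words = target_name.split()
--     for word in words:
--         if word.startswith(search_term):
--             return True
--
--     # Check if search term is contained in the full name
--     if search_term in target_name:
--         return True
--
--     return False
-- ===== SOURCE B (Python) =====
-- def _matches_target(search_term: str, target_name: str) -> bool:
--     """Check if search term matches target name (supports partial matching)."""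
--     # Exact match and word-prefix match are both special cases of containment.
--     return search_term in target_name
-- ===== Notes on version B (the rewrite author's own statement) =====
-- stated objective: simpler
-- what changed: B replaces the three branches (equality test, split-and-word-prefix loop, containment test) with the single containment test 'search_term in target_name', which subsumes the other two branches.
import Mathlib
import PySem

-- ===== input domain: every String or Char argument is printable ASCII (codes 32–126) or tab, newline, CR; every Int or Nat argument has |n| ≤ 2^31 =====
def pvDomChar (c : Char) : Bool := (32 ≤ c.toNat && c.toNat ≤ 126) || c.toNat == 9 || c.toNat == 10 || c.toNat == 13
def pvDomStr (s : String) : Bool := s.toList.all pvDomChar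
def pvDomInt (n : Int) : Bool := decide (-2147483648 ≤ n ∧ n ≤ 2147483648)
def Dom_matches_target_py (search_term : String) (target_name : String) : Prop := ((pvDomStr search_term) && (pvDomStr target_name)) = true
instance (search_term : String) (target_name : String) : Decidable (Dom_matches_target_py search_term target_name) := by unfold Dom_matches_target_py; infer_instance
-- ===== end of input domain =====

-- B replaces A's three branches (equality, split-and-word-prefix loop, containment) with the
-- single containment test, which subsumes the other two; objective: simpler (same cost).

-- ===== PORT A =====
-- the 'for word in words: if word.startswith(search_term): return True' loop
def pvWordLoop (search_term : String) : List String → Bool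
  | [] => false
  | word :: rest =>
      if PySem.Str.startswith word search_term then true
      else pvWordLoop search_term rest

def matches_target_py (search_term : String) (target_name : String) : Bool :=
  -- Exact match
  if search_term == target_name then true
  else
    -- Partial match from beginning of words
    let words := PySem.Str.split₀ target_name
    if pvWordLoop search_term words then true
    else
      -- Check if search term is contained in the full name
      if PySem.Str.isIn search_term target_name then true
      else false

-- ===== PORT B =====
def matches_target_py_alt (search_term : String) (target_name : String) : Bool :=
  PySem.Str.isIn search_term target_name

-- ===== PRECONDITION & SPEC =====
def Spec_matches_target_py (search_term : String) (target_name : String) (out : Bool) : Prop := out = matches_target_py_alt search_term target_name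
instance (search_term : String) (target_name : String) (out : Bool) : Decidable (Spec_matches_target_py search_term target_name out) := by unfold Spec_matches_target_py; infer_instance

-- ===== CLAIM (what is proved, stated in full; the proofs are below) =====
def Claim_equal_matches_target_py : Prop := ∀ (search_term : String) (target_name : String), Dom_matches_target_py search_term target_name → Spec_matches_target_py search_term target_name (matches_target_py search_term target_name)

-- ===== LEMMAS AND PROOFS =====

-- every word produced by split₀.go is an accumulator entry or an infix of cur.reverse ++ rest
theorem pv_go_infix (rest : List Char) :
    ∀ (cur : List Char) (acc : List (List Char)) (w : List Char),
      w ∈ PySem.Chars.split₀.go rest cur acc → w ∈ acc ∨ w <:+: cur.reverse ++ rest := by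
  induction rest with
  | nil =>
      intro cur acc w hw
      simp only [PySem.Chars.split₀.go] at hw
      split at hw
      · exact Or.inl (by simpa using hw)
      · have hw' : w ∈ acc ∨ w = cur.reverse := by simpa using hw
        rcases hw' with h | h
        · exact Or.inl h
        · subst h
          exact Or.inr (by simp)
  | cons c rest ih =>
      intro cur acc w hw
      simp only [PySem.Chars.split₀.go] at hw
      split at hw
      · split at hw
        · rcases ih [] acc w hw with h | h
          · exact Or.inl h
          · exact Or.inr (h.trans ⟨cur.reverse ++ [c], [], by simp⟩)
        · rcases ih [] (cur.reverse :: acc) w hw with h | h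
          · rcases List.mem_cons.mp h with h | h
            · subst h; exact Or.inr ⟨[], c :: rest, by simp⟩
            · exact Or.inl h
          · exact Or.inr (h.trans ⟨cur.reverse ++ [c], [], by simp⟩)
      · rcases ih (c :: cur) acc w hw with h | h
        · exact Or.inl h
        · exact Or.inr (by simpa using h)

theorem pv_split₀_infix (s : List Char) (w : List Char) (hw : w ∈ PySem.Chars.split₀ s) :
    w <:+: s := by
  rcases pv_go_infix s [] [] w hw with h | h
  · simp at h
  · simpa using h

theorem pv_wordLoop_infix (search_term target_name : String)
    (h : pvWordLoop search_term (PySem.Str.split₀ target_name) = true) :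
    search_term.toList <:+: target_name.toList := by
  have key : ∀ (ws : List String), (∀ w ∈ ws, w.toList <:+: target_name.toList) →
      pvWordLoop search_term ws = true → search_term.toList <:+: target_name.toList := by
    intro ws
    induction ws with
    | nil => intro _ h'; simp [pvWordLoop] at h'
    | cons w rest ih =>
        intro hws h'
        simp only [pvWordLoop] at h'
        split at h'
        · rename_i hsw
          rw [PySem.Str.startswith_eq, PySem.Chars.startswith_iff] at hsw
          exact hsw.isInfix.trans (hws w (by simp))
        · exact ih (fun x hx => hws x (List.mem_cons_of_mem _ hx)) h'
  refine key _ ?_ h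
  intro w hw
  have : w.toList ∈ PySem.Chars.split₀ target_name.toList := by
    rw [← PySem.Str.split₀_map_toList]
    exact List.mem_map_of_mem hw
  exact pv_split₀_infix _ _ this

-- ===== VERDICT (by name: the statement is the Claim_ definition above) =====
theorem matches_target_py_spec : Claim_equal_matches_target_py := by
  intro search_term target_name _
  unfold Spec_matches_target_py matches_target_py matches_target_py_alt
  by_cases h1 : (search_term == target_name) = true
  · have : search_term = target_name := by simpa using h1
    subst this
    simp only [h1, if_true]
    exact ((PySem.Str.isIn_iff_infix _ _).mpr (List.infix_refl _)).symm
  · by_cases h2 : pvWordLoop search_term (PySem.Str.split₀ target_name) = true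
    · simp only [h1, h2, if_true]
      exact ((PySem.Str.isIn_iff_infix _ _).mpr (pv_wordLoop_infix _ _ h2)).symm
    · simp [h1, h2]
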